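-- pv_equiv track=rewrite | github.com/danielsfafas/WhatsApp-IA | python-worker/calendar_availability.py | _collect_calendar_context_blob
-- ===== SOURCE A (Python) =====
-- from typing import Any
--
-- def _collect_user_blob(prior_turns: list[dict[str, Any]], user_text: str) -> str:
--     parts: list[str] = []
--     u = (user_text or "").strip()
--     if u:
--         parts.append(u)
--     for m in reversed(prior_turns or []):
--         if m.get("role") != "user":
--             continue
--         c = (m.get("content") or "").strip()
--         if c and c not in parts:
--             parts.append(c)
--         if len(parts) >= 8:
--             break
--     return "\n".join(reversed(parts))
--
-- def _collect_calendar_context_blob(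
--     prior_turns: list[dict[str, Any]],
--     user_text: str,
--     max_assistant: int = 8,
-- ) -> str:
--     """
--     Incluye últimos mensajes de *recepción* además del paciente, para interpretar
--     «sí», «a las 12», «mismo día» y la fecha de la cita previa en reagendamientos.
--     """
--     ublob = _collect_user_blob(prior_turns, user_text)
--     asst: list[str] = []
--     for m in reversed(prior_turns or []):
--         if m.get("role") != "assistant":
--             continue
--         c = (m.get("content") or "").strip()
--         if c:
--             asst.append(f"Recepción: {c}")
--         if len(asst) >= max_assistant:
--             break
--     asst.reverse()
--     if not asst:
--         return ublob
--     return "\n".join(asst) + "\n---\n" + ublob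
-- ===== SOURCE B (Python) =====
-- def _collect_calendar_context_blob(prior_turns, user_text, max_assistant=8):
--     seed = (user_text or "").strip()
--     users = []   # prior user contents, chronological, built back-to-front
--     assts = []   # assistant lines, chronological, built back-to-front
--     u_done = a_done = False
--     for m in reversed(prior_turns or []):
--         if u_done and a_done:
--             break
--         role = m.get("role")
--         if role == "user" and not u_done:
--             c = (m.get("content") or "").strip()
--             if c and c != seed and c not in users:
--                 users.insert(0, c)
--             if len(users) + (1 if seed else 0) >= 8:
--                 u_done = True
--         elif role == "assistant" and not a_done:
--             c = (m.get("content") or "").strip()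
--             if c:
--                 assts.insert(0, "Recepción: " + c)
--             if len(assts) >= max_assistant:
--                 a_done = True
--     if seed:
--         users.append(seed)
--     ublob = "\n".join(users)
--     if not assts:
--         return ublob
--     return "\n".join(assts) + "\n---\n" + ublob
-- ===== Notes on version B (the rewrite author's own statement) =====
-- stated objective: alternative
-- what changed: A's two separate reverse scans (the _collect_user_blob helper loop plus the assistant loop) are fused into one single reverse pass that maintains both lists at once with per-list done-flags, building each list back-to-front by prepending so the final list reversals disappear.
import Mathlib
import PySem

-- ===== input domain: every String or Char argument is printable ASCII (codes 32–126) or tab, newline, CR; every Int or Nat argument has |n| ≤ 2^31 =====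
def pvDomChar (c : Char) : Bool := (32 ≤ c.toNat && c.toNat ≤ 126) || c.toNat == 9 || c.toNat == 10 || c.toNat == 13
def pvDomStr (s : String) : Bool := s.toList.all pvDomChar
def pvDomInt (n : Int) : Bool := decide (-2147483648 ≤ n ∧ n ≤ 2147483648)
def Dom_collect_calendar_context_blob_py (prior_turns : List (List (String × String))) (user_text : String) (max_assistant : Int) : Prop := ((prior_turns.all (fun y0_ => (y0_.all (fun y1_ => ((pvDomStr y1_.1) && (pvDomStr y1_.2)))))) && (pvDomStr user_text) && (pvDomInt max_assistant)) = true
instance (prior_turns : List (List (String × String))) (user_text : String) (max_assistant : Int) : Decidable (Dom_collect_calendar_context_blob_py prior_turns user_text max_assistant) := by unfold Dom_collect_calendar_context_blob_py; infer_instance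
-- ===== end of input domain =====

-- B replaces A's two separate reverse scans (helper loop for user turns plus the
-- assistant loop) by ONE reverse pass maintaining both lists, built back-to-front
-- by prepending so no final reversal is needed (objective: alternative decomposition).

-- ===== PORT A =====
-- m.get(k) on a Python dict = first-match lookup: (PySem.Dict.mk m).get? k
-- (m.get("content") or "").strip(), as both sources compute it
def pvC (m : List (String × String)) : String :=
  PySem.Str.strip (((PySem.Dict.mk m).get? "content").getD "")

-- user loop of _collect_user_blob (break when len(parts) >= 8)
def pvA_userLoop : List (List (String × String)) → List String → List String
  | [], parts => parts
  | m :: ms, parts =>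
    if (PySem.Dict.mk m).get? "role" ≠ some "user" then pvA_userLoop ms parts
    else
      if (if pvC m ≠ "" ∧ pvC m ∉ parts then parts ++ [pvC m] else parts).length ≥ 8 then
        (if pvC m ≠ "" ∧ pvC m ∉ parts then parts ++ [pvC m] else parts)
      else pvA_userLoop ms (if pvC m ≠ "" ∧ pvC m ∉ parts then parts ++ [pvC m] else parts)

def pvA_userBlob (prior_turns : List (List (String × String))) (user_text : String) : String :=
  PySem.Str.join "\n"
    (pvA_userLoop prior_turns.reverse
      (if PySem.Str.strip user_text ≠ "" then [PySem.Str.strip user_text] else [])).reverse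

-- assistant loop (break when len(asst) >= max_assistant)
def pvA_asstLoop (maxA : Int) : List (List (String × String)) → List String → List String
  | [], acc => acc
  | m :: ms, acc =>
    if (PySem.Dict.mk m).get? "role" ≠ some "assistant" then pvA_asstLoop maxA ms acc
    else
      if (((if pvC m ≠ "" then acc ++ ["Recepción: " ++ pvC m] else acc).length : Int)) ≥ maxA then
        (if pvC m ≠ "" then acc ++ ["Recepción: " ++ pvC m] else acc)
      else pvA_asstLoop maxA ms (if pvC m ≠ "" then acc ++ ["Recepción: " ++ pvC m] else acc)

def collect_calendar_context_blob_py (prior_turns : List (List (String × String))) (user_text : String) (max_assistant : Int) : String :=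
  if (pvA_asstLoop max_assistant prior_turns.reverse []).reverse = [] then
    pvA_userBlob prior_turns user_text
  else
    PySem.Str.join "\n" (pvA_asstLoop max_assistant prior_turns.reverse []).reverse
      ++ "\n---\n" ++ pvA_userBlob prior_turns user_text

-- ===== PORT B =====
-- single fused reverse pass; both result lists are built front-extended (chronological)
def pvB_loop (seed : String) (maxA : Int) :
    List (List (String × String)) → List String → List String → Bool → Bool →
    List String × List String
  | [], users, assts, _, _ => (users, assts)
  | m :: ms, users, assts, udone, adone =>
    if udone && adone then (users, assts)
    else if (PySem.Dict.mk m).get? "role" = some "user" ∧ udone = false then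
      pvB_loop seed maxA ms
        (if pvC m ≠ "" ∧ pvC m ≠ seed ∧ pvC m ∉ users then pvC m :: users else users)
        assts
        (if (if pvC m ≠ "" ∧ pvC m ≠ seed ∧ pvC m ∉ users then pvC m :: users else users).length
              + (if seed ≠ "" then 1 else 0) ≥ 8 then true else udone)
        adone
    else if (PySem.Dict.mk m).get? "role" = some "assistant" ∧ adone = false then
      pvB_loop seed maxA ms users
        (if pvC m ≠ "" then ("Recepción: " ++ pvC m) :: assts else assts)
        udone
        (if (((if pvC m ≠ "" then ("Recepción: " ++ pvC m) :: assts else assts).length : Int)) ≥ maxA then true else adone)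
    else pvB_loop seed maxA ms users assts udone adone

-- assemble the blob from the two finished lists (seed appended at the end of users)
def pvB_build (seed : String) (r : List String × List String) : String :=
  if r.2 = [] then PySem.Str.join "\n" (if seed ≠ "" then r.1 ++ [seed] else r.1)
  else PySem.Str.join "\n" r.2 ++ "\n---\n"
        ++ PySem.Str.join "\n" (if seed ≠ "" then r.1 ++ [seed] else r.1)

def collect_calendar_context_blob_py_alt (prior_turns : List (List (String × String))) (user_text : String) (max_assistant : Int) : String :=
  pvB_build (PySem.Str.strip user_text)
    (pvB_loop (PySem.Str.strip user_text) max_assistant prior_turns.reverse [] [] false false)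

-- ===== PRECONDITION & SPEC =====
def Spec_collect_calendar_context_blob_py (prior_turns : List (List (String × String))) (user_text : String) (max_assistant : Int) (out : String) : Prop := out = collect_calendar_context_blob_py_alt prior_turns user_text max_assistant
instance (prior_turns : List (List (String × String))) (user_text : String) (max_assistant : Int) (out : String) : Decidable (Spec_collect_calendar_context_blob_py prior_turns user_text max_assistant out) := by unfold Spec_collect_calendar_context_blob_py; infer_instance

-- ===== CLAIM (what is proved, stated in full; the proofs are below) =====
def Claim_equal_collect_calendar_context_blob_py : Prop := ∀ (prior_turns : List (List (String × String))) (user_text : String) (max_assistant : Int), Dom_collect_calendar_context_blob_py prior_turns user_text max_assistant → Spec_collect_calendar_context_blob_py prior_turns user_text max_assistant (collect_calendar_context_blob_py prior_turns user_text max_assistant)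

-- ===== LEMMAS AND PROOFS =====

-- the seed prefix A keeps at the front of `parts`
def pvSp (seed : String) : List String := if seed ≠ "" then [seed] else []

lemma pvSp_length (seed : String) : (pvSp seed).length = if seed ≠ "" then 1 else 0 := by
  unfold pvSp; split_ifs <;> rfl

lemma pvMem_sp_append (seed c : String) (xs : List String) :
    (c ∉ pvSp seed ++ xs) ↔ (c ≠ seed ∨ seed = "") ∧ c ∉ xs := by
  unfold pvSp; split_ifs with h <;> simp_all

-- B's first component is frozen once udone is set
lemma pvB_fst_done (seed : String) (maxA : Int) :
    ∀ (ms : List (List (String × String))) (users assts : List String) (adone : Bool),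
      (pvB_loop seed maxA ms users assts true adone).1 = users := by
  intro ms
  induction ms with
  | nil => intro users assts adone; rfl
  | cons m ms ih =>
    intro users assts adone
    unfold pvB_loop
    by_cases had : adone = true
    · subst had; rw [if_pos (by simp)]
    · have had' : adone = false := by revert had; cases adone <;> simp
      subst had'
      rw [if_neg (by simp)]
      rw [if_neg (by simp : ¬((PySem.Dict.mk m).get? "role" = some "user" ∧ (true : Bool) = false))]
      by_cases hra : (PySem.Dict.mk m).get? "role" = some "assistant"
      · rw [if_pos (⟨hra, rfl⟩ : (PySem.Dict.mk m).get? "role" = some "assistant" ∧ (false : Bool) = false)]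
        exact ih users _ _
      · rw [if_neg (by simp [hra])]; exact ih users assts false

-- B's second component is frozen once adone is set
lemma pvB_snd_done (seed : String) (maxA : Int) :
    ∀ (ms : List (List (String × String))) (users assts : List String) (udone : Bool),
      (pvB_loop seed maxA ms users assts udone true).2 = assts := by
  intro ms
  induction ms with
  | nil => intro users assts udone; rfl
  | cons m ms ih =>
    intro users assts udone
    unfold pvB_loop
    by_cases hud : udone = true
    · subst hud; rw [if_pos (by simp)]
    · have hud' : udone = false := by revert hud; cases udone <;> simp
      subst hud'
      rw [if_neg (by simp)]
      by_cases hr : (PySem.Dict.mk m).get? "role" = some "user"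
      · rw [if_pos (⟨hr, rfl⟩ : (PySem.Dict.mk m).get? "role" = some "user" ∧ (false : Bool) = false)]
        exact ih _ assts _
      · rw [if_neg (by simp [hr])]
        rw [if_neg (by simp : ¬((PySem.Dict.mk m).get? "role" = some "assistant" ∧ (true : Bool) = false))]
        exact ih users assts false

-- user side: A's user loop vs B's first component, while udone is unset
lemma pvLu (seed : String) (maxA : Int) :
    ∀ (ms : List (List (String × String))) (users assts : List String) (adone : Bool),
      pvA_userLoop ms (pvSp seed ++ users.reverse)
        = pvSp seed ++ ((pvB_loop seed maxA ms users assts false adone).1).reverse := by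
  intro ms
  induction ms with
  | nil => intro users assts adone; simp [pvA_userLoop, pvB_loop]
  | cons m ms ih =>
    intro users assts adone
    unfold pvB_loop pvA_userLoop
    rw [if_neg (by simp : ¬((false && adone) = true))]
    by_cases hr : (PySem.Dict.mk m).get? "role" = some "user"
    · -- user turn: A's skip-guard is false, B takes the user branch
      rw [if_neg (by simp [hr] : ¬((PySem.Dict.mk m).get? "role" ≠ some "user"))]
      rw [if_pos (⟨hr, rfl⟩ : (PySem.Dict.mk m).get? "role" = some "user" ∧ (false : Bool) = false)]
      set c := pvC m with hc
      have hcond : (c ≠ "" ∧ c ∉ pvSp seed ++ users.reverse)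
          ↔ (c ≠ "" ∧ c ≠ seed ∧ c ∉ users) := by
        rw [pvMem_sp_append]
        constructor
        · rintro ⟨h1, h2, h3⟩
          refine ⟨h1, ?_, by simpa using h3⟩
          rcases h2 with h | h
          · exact h
          · intro he; exact h1 (he.trans h)
        · rintro ⟨h1, h2, h3⟩
          exact ⟨h1, Or.inl h2, by simpa using h3⟩
      have heq : pvSp seed ++ users.reverse ++ [c] = pvSp seed ++ (c :: users).reverse := by simp
      by_cases happ : c ≠ "" ∧ c ≠ seed ∧ c ∉ users
      · rw [if_pos (hcond.mpr happ), if_pos happ]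
        have hlen : (pvSp seed ++ users.reverse ++ [c]).length
            = (c :: users).length + (if seed ≠ "" then 1 else 0) := by
          simp [pvSp_length]; omega
        by_cases hbr : (c :: users).length + (if seed ≠ "" then 1 else 0) ≥ 8
        · rw [if_pos (by omega : (pvSp seed ++ users.reverse ++ [c]).length ≥ 8), if_pos hbr]
          rw [pvB_fst_done]
          exact heq
        · rw [if_neg (by omega : ¬(pvSp seed ++ users.reverse ++ [c]).length ≥ 8), if_neg hbr]
          rw [heq]
          exact ih (c :: users) assts adone
      · rw [if_neg (fun h => happ (hcond.mp h)), if_neg happ]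
        have hlen : (pvSp seed ++ users.reverse).length
            = users.length + (if seed ≠ "" then 1 else 0) := by
          simp [pvSp_length]; omega
        by_cases hbr : users.length + (if seed ≠ "" then 1 else 0) ≥ 8
        · rw [if_pos (by omega : (pvSp seed ++ users.reverse).length ≥ 8), if_pos hbr]
          rw [pvB_fst_done]
        · rw [if_neg (by omega : ¬(pvSp seed ++ users.reverse).length ≥ 8), if_neg hbr]
          exact ih users assts adone
    · -- not a user turn: A skips; B may touch assts only
      rw [if_pos hr, if_neg (fun h => hr h.1)]
      by_cases hra : (PySem.Dict.mk m).get? "role" = some "assistant"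
      · by_cases had : adone = false
        · rw [if_pos ⟨hra, had⟩]
          exact ih users _ _
        · rw [if_neg (fun h => had h.2)]
          exact ih users assts adone
      · rw [if_neg (fun h => hra h.1)]
        exact ih users assts adone

-- assistant side: A's assistant loop vs B's second component, while adone is unset
lemma pvLa (seed : String) (maxA : Int) :
    ∀ (ms : List (List (String × String))) (users assts : List String) (udone : Bool),
      pvA_asstLoop maxA ms assts.reverse
        = ((pvB_loop seed maxA ms users assts udone false).2).reverse := by
  intro ms
  induction ms with
  | nil => intro users assts udone; simp [pvA_asstLoop, pvB_loop]
  | cons m ms ih =>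
    intro users assts udone
    unfold pvB_loop pvA_asstLoop
    rw [if_neg (by simp : ¬((udone && false) = true))]
    by_cases hr : (PySem.Dict.mk m).get? "role" = some "assistant"
    · -- assistant turn
      have hru : (PySem.Dict.mk m).get? "role" ≠ some "user" := by simp [hr]
      rw [if_neg (by simp [hr] : ¬((PySem.Dict.mk m).get? "role" ≠ some "assistant"))]
      rw [if_neg (fun h => hru h.1 : ¬((PySem.Dict.mk m).get? "role" = some "user" ∧ udone = false))]
      rw [if_pos (⟨hr, rfl⟩ : (PySem.Dict.mk m).get? "role" = some "assistant" ∧ (false : Bool) = false)]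
      set c := pvC m with hc
      have heq : assts.reverse ++ ["Recepción: " ++ c]
          = (("Recepción: " ++ c) :: assts).reverse := by simp
      by_cases hne : c ≠ ""
      · rw [if_pos hne, if_pos hne]
        have hlen : ((assts.reverse ++ ["Recepción: " ++ c]).length : Int)
            = ((("Recepción: " ++ c) :: assts).length : Int) := by simp
        by_cases hbr : ((("Recepción: " ++ c) :: assts).length : Int) ≥ maxA
        · rw [if_pos (by omega : ((assts.reverse ++ ["Recepción: " ++ c]).length : Int) ≥ maxA), if_pos hbr]
          rw [pvB_snd_done]
          exact heq
        · rw [if_neg (by omega : ¬((assts.reverse ++ ["Recepción: " ++ c]).length : Int) ≥ maxA), if_neg hbr]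
          rw [heq]
          exact ih users (("Recepción: " ++ c) :: assts) udone
      · rw [if_neg hne, if_neg hne]
        have hlen : ((assts.reverse.length : Int)) = ((assts.length : Int)) := by simp
        by_cases hbr : ((assts.length : Int)) ≥ maxA
        · rw [if_pos (by omega : ((assts.reverse.length : Int)) ≥ maxA), if_pos hbr]
          rw [pvB_snd_done]
        · rw [if_neg (by omega : ¬((assts.reverse.length : Int)) ≥ maxA), if_neg hbr]
          exact ih users assts udone
    · -- not an assistant turn
      rw [if_pos hr]
      by_cases hru : (PySem.Dict.mk m).get? "role" = some "user"
      · by_cases hud : udone = false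
        · rw [if_pos (⟨hru, hud⟩ : (PySem.Dict.mk m).get? "role" = some "user" ∧ udone = false)]
          exact ih _ assts _
        · rw [if_neg (fun h => hud h.2 : ¬((PySem.Dict.mk m).get? "role" = some "user" ∧ udone = false))]
          rw [if_neg (fun h => hr h.1 : ¬((PySem.Dict.mk m).get? "role" = some "assistant" ∧ (false : Bool) = false))]
          exact ih users assts udone
      · rw [if_neg (fun h => hru h.1 : ¬((PySem.Dict.mk m).get? "role" = some "user" ∧ udone = false))]
        rw [if_neg (fun h => hr h.1 : ¬((PySem.Dict.mk m).get? "role" = some "assistant" ∧ (false : Bool) = false))]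
        exact ih users assts udone

-- ===== VERDICT (by name: the statement is the Claim_ definition above) =====
theorem collect_calendar_context_blob_py_spec : Claim_equal_collect_calendar_context_blob_py := by
  intro prior_turns user_text max_assistant _
  show _ = _
  unfold collect_calendar_context_blob_py collect_calendar_context_blob_py_alt pvA_userBlob pvB_build
  set seed := PySem.Str.strip user_text with hs
  set r := pvB_loop seed max_assistant prior_turns.reverse [] [] false false with hr
  have hu := pvLu seed max_assistant prior_turns.reverse [] [] false
  have ha := pvLa seed max_assistant prior_turns.reverse [] [] false
  rw [List.reverse_nil, List.append_nil] at hu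
  rw [List.reverse_nil] at ha
  rw [← hr] at hu ha
  unfold pvSp at hu
  have hublob : (pvA_userLoop prior_turns.reverse (if seed ≠ "" then [seed] else [])).reverse
      = (if seed ≠ "" then r.1 ++ [seed] else r.1) := by
    rw [hu]
    split_ifs <;> simp
  have hasst : (pvA_asstLoop max_assistant prior_turns.reverse []).reverse = r.2 := by
    rw [ha, List.reverse_reverse]
  rw [hublob, hasst]
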